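-- pv_equiv track=rewrite | github.com/a-brandon/practice | edabit/alphabetically_sorted.py | is_alphabetically_sorted
-- ===== SOURCE A (Python) =====
-- from string import punctuation
--
-- def is_alphabetically_sorted(sentence):
--     # Needs a lot of refactoring. Bad bruteforce solution
--     new_sentence = ''
--     for ch in sentence:
--         if ch not in punctuation:
--             new_sentence += ch.lower()
--     split_sentence = new_sentence.split()
--     count = 0
--     for chars in split_sentence:
--         joined_word = [''.join(sorted(chars))]
--         for word in joined_word:
--             if word in split_sentence and len(word) >= 3:
--                 count += 1
--     return bool(count)
-- ===== SOURCE B (Python) =====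
-- from string import punctuation
--
-- def is_alphabetically_sorted(sentence):
--     # A word's alphabetized form appears among the words iff some word (len>=3)
--     # is itself already in nondecreasing character order, so no sorting or
--     # membership test is needed: just scan each word's adjacent pairs.
--     cleaned = ''.join(ch.lower() for ch in sentence if ch not in punctuation)
--     return any(len(w) >= 3 and all(a <= b for a, b in zip(w, w[1:]))
--                for w in cleaned.split())
-- ===== Notes on version B (the rewrite author's own statement) =====
-- stated objective: alternative
-- what changed: Replaces sort-each-word-and-scan-the-word-list-for-its-sorted-form with a mathematical equivalence: the answer is true iff some word of length >= 3 is itself in nondecreasing character order, checked by comparing adjacent characters; no sorting, no membership tests, no counter.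
import Mathlib
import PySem

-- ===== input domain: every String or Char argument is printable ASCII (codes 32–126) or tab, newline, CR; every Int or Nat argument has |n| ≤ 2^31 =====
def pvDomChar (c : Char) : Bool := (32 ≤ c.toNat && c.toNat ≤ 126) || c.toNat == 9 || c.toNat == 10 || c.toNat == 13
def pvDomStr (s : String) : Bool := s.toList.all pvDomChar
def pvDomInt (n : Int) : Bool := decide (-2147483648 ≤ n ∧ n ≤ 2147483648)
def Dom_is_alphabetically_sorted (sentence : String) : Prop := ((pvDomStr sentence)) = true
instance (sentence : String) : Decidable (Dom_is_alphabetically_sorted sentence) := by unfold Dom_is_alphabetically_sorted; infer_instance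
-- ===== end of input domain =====

-- B drops A's per-word sorting and word-list membership scan entirely: the sought sorted form
-- exists among the words iff some word (len >= 3) is itself in nondecreasing character order,
-- checked by comparing adjacent characters (objective: alternative algorithm).

-- string.punctuation
def pvPunct : List Char := "!\"#$%&'()*+,-./:;<=>?@[\\]^_`{|}~".toList

-- ===== PORT A =====
-- ''.join(sorted(chars)) is ported as PySem.List.sorted on the word's character list
-- (joining single characters with '' is the identity on the character list — exact).
def is_alphabetically_sorted (sentence : String) : Bool :=
  let new_sentence : List Char :=
    sentence.toList.foldl
      (fun acc ch => if !(pvPunct.contains ch) then acc ++ [PySem.Chars.lowerChar ch] else acc) []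
  let split_sentence := PySem.Chars.split₀ new_sentence
  let count : Int :=
    split_sentence.foldl
      (fun count chars =>
        let joined_word := [PySem.List.sorted chars (fun c => c) false]
        joined_word.foldl
          (fun count word =>
            if word ∈ split_sentence ∧ 3 ≤ word.length then count + 1 else count)
          count)
      0
  decide (count ≠ 0)

-- ===== PORT B =====
-- ''.join(generator) over the kept lowered characters is the filtered, lowered character list;
-- zip(w, w[1:]) is w.zip w.tail (exact: w[1:] of a word is its tail).
def is_alphabetically_sorted_alt (sentence : String) : Bool :=
  let cleaned : List Char :=
    PySem.Chars.lower (sentence.toList.filter (fun ch => !(pvPunct.contains ch)))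
  (PySem.Chars.split₀ cleaned).any
    (fun w => decide (3 ≤ w.length) && (w.zip w.tail).all (fun p => decide (p.1 ≤ p.2)))

-- ===== PRECONDITION & SPEC =====
def Spec_is_alphabetically_sorted (sentence : String) (out : Bool) : Prop := out = is_alphabetically_sorted_alt sentence
instance (sentence : String) (out : Bool) : Decidable (Spec_is_alphabetically_sorted sentence out) := by unfold Spec_is_alphabetically_sorted; infer_instance

-- ===== CLAIM (what is proved, stated in full; the proofs are below) =====
def Claim_equal_is_alphabetically_sorted : Prop := ∀ (sentence : String), Dom_is_alphabetically_sorted sentence → Spec_is_alphabetically_sorted sentence (is_alphabetically_sorted sentence)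

-- ===== LEMMAS AND PROOFS =====

-- Both preprocessings yield the same word list.
theorem pv_words_eq (sentence : String) :
    PySem.Chars.split₀
        (sentence.toList.foldl
          (fun acc ch => if !(pvPunct.contains ch) then acc ++ [PySem.Chars.lowerChar ch] else acc) []) =
      PySem.Chars.split₀
        (PySem.Chars.lower (sentence.toList.filter (fun ch => !(pvPunct.contains ch)))) := by
  rw [PySem.List.foldl_append_if]
  rfl

-- A's count counted with countP.
theorem pv_count_eq (ws : List (List Char)) (a : Int) :
    ws.foldl
        (fun count chars =>
          if PySem.List.sorted chars (fun c => c) false ∈ ws ∧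
              3 ≤ (PySem.List.sorted chars (fun c => c) false).length then count + 1 else count) a
      = a + (ws.countP
          (fun w => decide (PySem.List.sorted w (fun c => c) false ∈ ws ∧
              3 ≤ (PySem.List.sorted w (fun c => c) false).length)) : Int) := by
  rw [← PySem.List.foldl_count_if]
  congr 1
  funext count chars
  by_cases h : (PySem.List.sorted chars (fun c => c) false ∈ ws ∧
      3 ≤ (PySem.List.sorted chars (fun c => c) false).length)
  · rw [if_pos h, if_pos (decide_eq_true h)]
  · rw [if_neg h, if_neg (fun hc => h (of_decide_eq_true hc))]

-- adjacent-pair test = Pairwise order of the word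
theorem pv_zip_pairwise (w : List Char) :
    ((w.zip w.tail).all (fun p => decide (p.1 ≤ p.2)) = true) ↔ w.Pairwise (· ≤ ·) := by
  induction w with
  | nil => simp
  | cons a t ih =>
    cases t with
    | nil => simp
    | cons b u =>
      simp only [List.tail_cons, List.zip_cons_cons, List.all_cons, Bool.and_eq_true,
        decide_eq_true_eq, List.pairwise_cons] at *
      constructor
      · rintro ⟨hab, h⟩
        obtain ⟨hb, hu⟩ := ih.mp h
        refine ⟨fun x hx => ?_, hb, hu⟩
        rcases List.mem_cons.mp hx with rfl | hx
        · exact hab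
        · exact le_trans hab (hb x hx)
      · rintro ⟨ha, hb, hu⟩
        exact ⟨ha b (List.mem_cons_self), ih.mpr ⟨hb, hu⟩⟩

-- A's witnessing word exists iff some word is itself in nondecreasing order (len >= 3):
-- a present sorted form is such a word; a nondecreasing word is its own sorted form.
theorem pv_exists_iff (ws : List (List Char)) :
    (∃ w ∈ ws, PySem.List.sorted w (fun c => c) false ∈ ws ∧
        3 ≤ (PySem.List.sorted w (fun c => c) false).length) ↔
      (∃ v ∈ ws, 3 ≤ v.length ∧ v.Pairwise (· ≤ ·)) := by
  constructor
  · rintro ⟨w, _, hmem, hlen⟩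
    exact ⟨PySem.List.sorted w (fun c => c) false, hmem, hlen,
      PySem.List.sorted_pairwise (key := fun c => c) (xs := w)⟩
  · rintro ⟨v, hv, hlen, hp⟩
    have hs : PySem.List.sorted v (fun c => c) false = v :=
      PySem.List.sorted_eq_self_of_pairwise v (fun c => c) hp
    exact ⟨v, hv, by rw [hs]; exact ⟨hv, hlen⟩⟩

-- combined body-level equality, over an arbitrary word list
theorem pv_main (ws : List (List Char)) :
    decide
        (ws.foldl
            (fun count chars =>
              let joined_word := [PySem.List.sorted chars (fun c => c) false]
              joined_word.foldl
                (fun count word => if word ∈ ws ∧ 3 ≤ word.length then count + 1 else count)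
                count)
            (0 : Int) ≠ 0)
      = ws.any (fun w => decide (3 ≤ w.length) && (w.zip w.tail).all (fun p => decide (p.1 ≤ p.2))) := by
  simp only [List.foldl_cons, List.foldl_nil, pv_count_eq]
  have hiff :
      (∃ w ∈ ws, PySem.List.sorted w (fun c => c) false ∈ ws ∧
          3 ≤ (PySem.List.sorted w (fun c => c) false).length) ↔
        (ws.any (fun w => decide (3 ≤ w.length) &&
            (w.zip w.tail).all (fun p => decide (p.1 ≤ p.2))) = true) := by
    rw [pv_exists_iff, List.any_eq_true]
    constructor
    · rintro ⟨v, hv, hlen, hp⟩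
      exact ⟨v, hv, by simp [hlen, (pv_zip_pairwise v).mpr hp]⟩
    · rintro ⟨v, hv, h⟩
      simp only [Bool.and_eq_true, decide_eq_true_eq] at h
      exact ⟨v, hv, h.1, (pv_zip_pairwise v).mp h.2⟩
  by_cases he : ∃ w ∈ ws, PySem.List.sorted w (fun c => c) false ∈ ws ∧
      3 ≤ (PySem.List.sorted w (fun c => c) false).length
  · have hpos : 0 < ws.countP
        (fun w => decide (PySem.List.sorted w (fun c => c) false ∈ ws ∧
            3 ≤ (PySem.List.sorted w (fun c => c) false).length)) := by
      obtain ⟨w, hw, hP⟩ := he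
      exact List.countP_pos_iff.mpr ⟨w, hw, decide_eq_true hP⟩
    rw [hiff.mp he]
    simp only [decide_eq_true_eq]
    omega
  · have hz : ws.countP
        (fun w => decide (PySem.List.sorted w (fun c => c) false ∈ ws ∧
            3 ≤ (PySem.List.sorted w (fun c => c) false).length)) = 0 := by
      rw [List.countP_eq_zero]
      intro w hw hP
      exact he ⟨w, hw, of_decide_eq_true hP⟩
    have hf : ¬ (ws.any (fun w => decide (3 ≤ w.length) &&
        (w.zip w.tail).all (fun p => decide (p.1 ≤ p.2))) = true) := fun h => he (hiff.mpr h)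
    rw [Bool.eq_false_iff.mpr hf, hz]
    simp

theorem is_alphabetically_sorted_eq_alt (sentence : String) :
    is_alphabetically_sorted sentence = is_alphabetically_sorted_alt sentence := by
  simp only [is_alphabetically_sorted, is_alphabetically_sorted_alt]
  rw [pv_words_eq]
  exact pv_main _

-- ===== VERDICT (by name: the statement is the Claim_ definition above) =====
theorem is_alphabetically_sorted_spec : Claim_equal_is_alphabetically_sorted := by
  intro sentence _
  unfold Spec_is_alphabetically_sorted
  exact is_alphabetically_sorted_eq_alt sentence
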